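-- pv_equiv track=rewrite | github.com/LadyM2019/SoftUni | Python/Python-Basics/5.Simple_Loops/7.Vowels Sum.py | count_vowel_values2
-- ===== SOURCE A (Python) =====
-- def count_vowel_values2(word):
--     total_sum = 0
--
--     for i in range(0, len(word)):
--         if word[i] == 'a':
--             total_sum += 1
--
--         if word[i] == 'e':
--             total_sum += 2
--
--         if word[i] == 'i':
--             total_sum += 3
--
--         if word[i] == 'o':
--             total_sum += 4
--
--         if word[i] == 'u':
--             total_sum += 5
--
--     return total_sum
-- ===== SOURCE B (Python) =====
-- def count_vowel_values2(word):
--     weights = {'a': 1, 'e': 2, 'i': 3, 'o': 4, 'u': 5}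
--     return sum(w * word.count(v) for v, w in weights.items())
-- ===== Notes on version B (the rewrite author's own statement) =====
-- stated objective: idiomatic
-- what changed: Instead of scanning each character and testing it against every vowel, B loops over the five weighted vowels and multiplies each weight by str.count, summing the products.
import Mathlib
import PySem

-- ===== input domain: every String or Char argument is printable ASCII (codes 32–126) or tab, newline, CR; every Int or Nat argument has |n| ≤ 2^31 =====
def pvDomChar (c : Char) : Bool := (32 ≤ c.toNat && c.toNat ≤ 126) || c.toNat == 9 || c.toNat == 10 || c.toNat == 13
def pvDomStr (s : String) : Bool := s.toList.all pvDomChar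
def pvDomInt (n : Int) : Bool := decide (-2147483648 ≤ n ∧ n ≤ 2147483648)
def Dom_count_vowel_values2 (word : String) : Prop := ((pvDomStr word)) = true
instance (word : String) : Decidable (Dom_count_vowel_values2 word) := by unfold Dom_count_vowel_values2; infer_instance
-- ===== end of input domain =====

-- B sums weight * word.count(vowel) over the five weighted vowels instead of
-- scanning each character and testing it against every vowel (idiomatic).

-- ===== PORT A =====
def count_vowel_values2 (word : String) : Int :=
  (PySem.List.pyRange 0 (PySem.Str.len word) 1).foldl
    (fun total_sum i =>
      -- word[i]; i always lies in range here, so the default is never used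
      let c := PySem.List.pyGetD word.toList i ' '
      let total_sum := if c == 'a' then total_sum + 1 else total_sum
      let total_sum := if c == 'e' then total_sum + 2 else total_sum
      let total_sum := if c == 'i' then total_sum + 3 else total_sum
      let total_sum := if c == 'o' then total_sum + 4 else total_sum
      let total_sum := if c == 'u' then total_sum + 5 else total_sum
      total_sum) 0

-- ===== PORT B =====
def count_vowel_values2_alt (word : String) : Int :=
  ([('a', (1 : Int)), ('e', 2), ('i', 3), ('o', 4), ('u', 5)].map
    (fun p => p.2 * (PySem.Str.count word (String.ofList [p.1]) : Int))).sum

-- ===== PRECONDITION & SPEC =====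
def Spec_count_vowel_values2 (word : String) (out : Int) : Prop := out = count_vowel_values2_alt word
instance (word : String) (out : Int) : Decidable (Spec_count_vowel_values2 word out) := by unfold Spec_count_vowel_values2; infer_instance

-- ===== CLAIM (what is proved, stated in full; the proofs are below) =====
def Claim_equal_count_vowel_values2 : Prop := ∀ (word : String), Dom_count_vowel_values2 word → Spec_count_vowel_values2 word (count_vowel_values2 word)

-- ===== LEMMAS AND PROOFS =====

-- A's per-character loop body, as a fold over the character list: its closed form.
theorem pv_A_eq (cs : List Char) (a : Int) :
    cs.foldl (fun total_sum c =>
      let t1 := if c == 'a' then total_sum + 1 else total_sum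
      let t2 := if c == 'e' then t1 + 2 else t1
      let t3 := if c == 'i' then t2 + 3 else t2
      let t4 := if c == 'o' then t3 + 4 else t3
      if c == 'u' then t4 + 5 else t4) a
    = a + (cs.count 'a' : Int) + 2 * cs.count 'e' + 3 * cs.count 'i'
        + 4 * cs.count 'o' + 5 * cs.count 'u' := by
  induction cs generalizing a with
  | nil => simp
  | cons c t ih =>
    simp only [List.foldl_cons, ih, List.count_cons]
    by_cases h1 : c = 'a' <;> by_cases h2 : c = 'e' <;> by_cases h3 : c = 'i' <;>
      by_cases h4 : c = 'o' <;> by_cases h5 : c = 'u' <;>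
      simp_all <;> try ring

theorem pv_go_single (c : Char) : ∀ (l : List Char) (fuel acc : ℕ), l.length ≤ fuel →
    PySem.Chars.count.go [c] fuel l acc = acc + l.count c := by
  intro l
  induction l with
  | nil => intro fuel acc _; cases fuel <;> simp [PySem.Chars.count.go]
  | cons h t ih =>
    intro fuel acc hf
    cases fuel with
    | zero => simp at hf
    | succ n =>
      rw [PySem.Chars.count.go]
      by_cases hc : h = c
      · subst hc
        simp only [List.isPrefixOf, List.count_cons]
        simp only [BEq.rfl, Bool.true_and, if_true]
        rw [show List.drop (List.length [h]) (h :: t) = t from rfl]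
        rw [ih n (acc+1) (by simpa using hf)]
        omega
      · have : ([c].isPrefixOf (h :: t)) = false := by
          simp [List.isPrefixOf]; intro hh; exact absurd hh.symm hc
        rw [this]
        simp only [if_false, Bool.false_eq_true]
        rw [ih n acc (by simpa using Nat.le_of_succ_le_succ hf)]
        simp [hc]

-- str.count with a one-character needle is the count of that character.
theorem pv_count_single (s : String) (c : Char) :
    (PySem.Str.count s (String.ofList [c]) : Int) = s.toList.count c := by
  simp only [PySem.Str.count, PySem.Chars.count]
  rw [if_neg (by simp)]
  simp only [String.toList_ofList]
  rw [pv_go_single c s.toList s.toList.length 0 le_rfl]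
  simp

-- ===== VERDICT (by name: the statement is the Claim_ definition above) =====
theorem count_vowel_values2_spec : Claim_equal_count_vowel_values2 := by
  intro word _
  unfold Spec_count_vowel_values2 count_vowel_values2 count_vowel_values2_alt
  refine (PySem.List.foldl_pyRange_pyGetD word.toList ' '
      (fun total_sum c =>
        let t1 := if c == 'a' then total_sum + 1 else total_sum
        let t2 := if c == 'e' then t1 + 2 else t1
        let t3 := if c == 'i' then t2 + 3 else t2
        let t4 := if c == 'o' then t3 + 4 else t3
        if c == 'u' then t4 + 5 else t4) 0 (a := 0) le_rfl).trans ?_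
  simp only [Int.toNat_zero, List.drop_zero]
  rw [pv_A_eq]
  simp only [List.map_cons, List.map_nil, List.sum_cons, List.sum_nil, pv_count_single]
  ring
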